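-- pv_equiv track=rewrite | github.com/Rejean-McCormick/abstract-wiki-architect | app/core/domain/morphology/slavic.py | _apply_suffix_rules
-- ===== SOURCE A (Python) =====
-- from typing import Any, Dict
--
-- def _apply_suffix_rules(word: str, rules: Any) -> str:
--     """
--     Apply the first matching suffix replacement rule to `word`.
--
--     Rules are expected to be a list of dicts:
--     [{ "ends_with": "...", "replace_with": "..." }, ...]
--     """
--     if not isinstance(rules, list):
--         return word
--
--     # Match longer endings first to avoid "tel" vs "el" type conflicts
--     sorted_rules = sorted(
--         rules,
--         key=lambda r: len(r.get("ends_with", "")),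
--         reverse=True,
--     )
--
--     for rule in sorted_rules:
--         end = rule.get("ends_with", "")
--         repl = rule.get("replace_with", "")
--         if end and word.endswith(end):
--             stem = word[: -len(end)]
--             return stem + repl
--
--     return word
-- ===== SOURCE B (Python) =====
-- def _apply_suffix_rules(word: str, rules) -> str:
--     """Single pass over rules (no sorting): keep the best (longest, earliest) match."""
--     if not isinstance(rules, list):
--         return word
--     best_len = -1
--     best = word
--     for rule in rules:
--         end = rule.get("ends_with", "")
--         repl = rule.get("replace_with", "")
--         if end and word.endswith(end) and len(end) > best_len:
--             best_len = len(end)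
--             best = word[: -len(end)] + repl
--     return best
-- ===== Notes on version B (the rewrite author's own statement) =====
-- stated objective: alternative
-- what changed: B replaces A's sort-then-scan (stable sort by suffix length descending, return first match) with one linear pass over the rules in original order, tracking the best match with a strict length comparison so that the longest, earliest-matching suffix wins.
import Mathlib
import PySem

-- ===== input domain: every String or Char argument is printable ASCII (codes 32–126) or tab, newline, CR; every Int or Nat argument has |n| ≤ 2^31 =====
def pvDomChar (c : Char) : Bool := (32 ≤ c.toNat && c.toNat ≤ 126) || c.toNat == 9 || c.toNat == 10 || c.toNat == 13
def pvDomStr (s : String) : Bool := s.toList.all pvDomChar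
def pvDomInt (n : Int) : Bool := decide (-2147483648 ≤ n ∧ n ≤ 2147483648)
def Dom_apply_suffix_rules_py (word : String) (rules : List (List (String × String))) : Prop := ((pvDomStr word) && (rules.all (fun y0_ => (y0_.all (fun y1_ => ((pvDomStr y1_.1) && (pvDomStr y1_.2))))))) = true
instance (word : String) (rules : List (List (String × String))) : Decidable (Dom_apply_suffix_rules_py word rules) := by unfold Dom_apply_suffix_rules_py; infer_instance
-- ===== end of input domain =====

-- B replaces A's sort-then-scan with one linear pass tracking the best (longest, earliest) suffix match.


-- dict.get(k, default) on an association list (first match), used by both ports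
def pvDictGetD (d : List (String × String)) (k dflt : String) : String :=
  match d.find? (fun p => p.1 == k) with
  | some p => p.2
  | none => dflt

-- ===== PORT A =====
-- the 'for rule in sorted_rules: …' loop with its early return
def pvLoopA (word : String) : List (List (String × String)) → String
  | [] => word
  | r :: rest =>
    let e := pvDictGetD r "ends_with" ""
    let repl := pvDictGetD r "replace_with" ""
    if (!(e == "")) && PySem.Str.endswith word e then
      PySem.Str.slice word none (some (-(PySem.Str.len e))) ++ repl
    else pvLoopA word rest

def apply_suffix_rules_py (word : String) (rules : List (List (String × String))) : String :=
  let sorted_rules := PySem.List.sorted rules (fun r => PySem.Str.len (pvDictGetD r "ends_with" "")) true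
  pvLoopA word sorted_rules

-- ===== PORT B =====
def apply_suffix_rules_py_alt (word : String) (rules : List (List (String × String))) : String :=
  let res := rules.foldl (fun (st : Int × String) r =>
    let e := pvDictGetD r "ends_with" ""
    let repl := pvDictGetD r "replace_with" ""
    if (!(e == "")) && PySem.Str.endswith word e && decide (PySem.Str.len e > st.1) then
      (PySem.Str.len e, PySem.Str.slice word none (some (-(PySem.Str.len e))) ++ repl)
    else st) ((-1 : Int), word)
  res.2

-- ===== PRECONDITION & SPEC =====
def Spec_apply_suffix_rules_py (word : String) (rules : List (List (String × String))) (out : String) : Prop := out = apply_suffix_rules_py_alt word rules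
instance (word : String) (rules : List (List (String × String))) (out : String) : Decidable (Spec_apply_suffix_rules_py word rules out) := by unfold Spec_apply_suffix_rules_py; infer_instance

-- ===== CLAIM (what is proved, stated in full; the proofs are below) =====
def Claim_equal_apply_suffix_rules_py : Prop := ∀ (word : String) (rules : List (List (String × String))), Dom_apply_suffix_rules_py word rules → Spec_apply_suffix_rules_py word rules (apply_suffix_rules_py word rules)

-- ===== LEMMAS AND PROOFS =====

-- the key A sorts by, the match test, and the returned string of a matching rule
def pvKey (r : List (String × String)) : Int := PySem.Str.len (pvDictGetD r "ends_with" "")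
def pvMatch (word : String) (r : List (String × String)) : Bool :=
  (!(pvDictGetD r "ends_with" "" == "")) && PySem.Str.endswith word (pvDictGetD r "ends_with" "")
def pvStem (word : String) (r : List (String × String)) : String :=
  PySem.Str.slice word none (some (-(PySem.Str.len (pvDictGetD r "ends_with" "")))) ++ pvDictGetD r "replace_with" ""

theorem pvKey_nonneg (r : List (String × String)) : 0 ≤ pvKey r := by
  simp [pvKey, PySem.Str.len]

theorem pvLoopA_eq_find (word : String) (s : List (List (String × String))) :
    pvLoopA word s = (match s.find? (pvMatch word) with
      | some m => pvStem word m
      | none => word) := by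
  induction s with
  | nil => rfl
  | cons r rest ih =>
    simp only [pvLoopA]
    rw [show ((!(pvDictGetD r "ends_with" "" == "")) && PySem.Str.endswith word (pvDictGetD r "ends_with" "")) = pvMatch word r from rfl]
    cases h : pvMatch word r
    · simp only [List.find?_cons, h, Bool.false_eq_true, if_false]
      exact ih
    · simp only [List.find?_cons, h, if_true]
      rfl

theorem find_insertBy_not_match (word : String) (x : List (String × String))
    (acc : List (List (String × String))) (hx : pvMatch word x = false) (br : List (String × String) → List (String × String) → Bool) :
    (PySem.List.insertBy br x acc).find? (pvMatch word) = acc.find? (pvMatch word) := by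
  induction acc with
  | nil => simp [PySem.List.insertBy, List.find?, hx]
  | cons y ys ih =>
    simp only [PySem.List.insertBy]
    split
    · simp [List.find?, hx]
    · cases hy : pvMatch word y <;> simp [List.find?, hy, ih]

theorem find_insertBy_match (word : String) (x : List (String × String))
    (acc : List (List (String × String)))
    (hacc : acc.Pairwise (fun a b => pvKey b ≤ pvKey a))
    (hx : pvMatch word x = true) :
    (PySem.List.insertBy (fun a b => decide (pvKey b < pvKey a)) x acc).find? (pvMatch word) =
      (match acc.find? (pvMatch word) with
        | some m => if pvKey m < pvKey x then some x else some m
        | none => some x) := by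
  induction acc with
  | nil => simp [PySem.List.insertBy, List.find?, hx]
  | cons y ys ih =>
    rcases List.pairwise_cons.mp hacc with ⟨hy, hys⟩
    simp only [PySem.List.insertBy]
    split
    · -- pvKey y < pvKey x : x inserted in front
      rename_i hlt
      have hylt : pvKey y < pvKey x := of_decide_eq_true hlt
      cases hym : pvMatch word y
      · -- y does not match
        simp only [List.find?, hx, hym]
        cases hf : ys.find? (pvMatch word) with
        | none => simp
        | some m =>
          have hm : m ∈ ys := List.mem_of_find?_eq_some hf
          have : pvKey m ≤ pvKey y := hy m hm
          simp [show pvKey m < pvKey x by omega]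
      · simp [List.find?, hx, hym, hylt]
    · -- ¬ (pvKey y < pvKey x) : keep y, recurse
      rename_i hge
      have hyge : ¬ pvKey y < pvKey x := by simpa using hge
      cases hym : pvMatch word y
      · simp only [List.find?, hym]
        exact ih hys
      · simp [List.find?, hym, hyge]

-- B's fold computes (key, stem) of the first match of the reverse-sorted list
theorem foldl_eq_find_sorted (word : String) (l : List (List (String × String))) :
    (l.foldl (fun (st : Int × String) r =>
      let e := pvDictGetD r "ends_with" ""
      let repl := pvDictGetD r "replace_with" ""
      if (!(e == "")) && PySem.Str.endswith word e && decide (PySem.Str.len e > st.1) then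
        (PySem.Str.len e, PySem.Str.slice word none (some (-(PySem.Str.len e))) ++ repl)
      else st) ((-1 : Int), word)) =
    (match (PySem.List.sorted l pvKey true).find? (pvMatch word) with
      | some m => (pvKey m, pvStem word m)
      | none => ((-1 : Int), word)) := by
  induction l using List.reverseRecOn with
  | nil => simp [PySem.List.sorted]
  | append_singleton l x ih =>
    rw [List.foldl_append, List.foldl_cons, List.foldl_nil, ih]
    have hsorted : PySem.List.sorted (l ++ [x]) pvKey true
        = PySem.List.insertBy (fun a b => decide (pvKey b < pvKey a)) x (PySem.List.sorted l pvKey true) := by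
      rw [PySem.List.sorted_rev_eq_foldl_insertBy, PySem.List.sorted_rev_eq_foldl_insertBy, List.foldl_append,
        List.foldl_cons, List.foldl_nil]
    rw [hsorted]
    by_cases hx : pvMatch word x = true
    · rw [find_insertBy_match word x _ (PySem.List.sorted_pairwise_rev l pvKey) hx]
      cases hf : (PySem.List.sorted l pvKey true).find? (pvMatch word) with
      | none =>
        have : (0 : Int) ≤ pvKey x := pvKey_nonneg x
        have hcond : ((!(pvDictGetD x "ends_with" "" == "")) && PySem.Str.endswith word (pvDictGetD x "ends_with" "") && decide (PySem.Str.len (pvDictGetD x "ends_with" "") > (-1 : Int))) = true := by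
          rw [show ((!(pvDictGetD x "ends_with" "" == "")) && PySem.Str.endswith word (pvDictGetD x "ends_with" "")) = pvMatch word x from rfl, hx]
          simp only [Bool.true_and, decide_eq_true_iff]
          show (-1 : Int) < pvKey x
          omega
        simp only [hcond]
        simp [pvKey, pvStem]
      | some m =>
        by_cases hkm : pvKey m < pvKey x
        · have hcond : ((!(pvDictGetD x "ends_with" "" == "")) && PySem.Str.endswith word (pvDictGetD x "ends_with" "") && decide (PySem.Str.len (pvDictGetD x "ends_with" "") > pvKey m)) = true := by
            rw [show ((!(pvDictGetD x "ends_with" "" == "")) && PySem.Str.endswith word (pvDictGetD x "ends_with" "")) = pvMatch word x from rfl, hx]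
            simpa [pvKey] using hkm
          simp only [hcond]
          rw [if_pos hkm]
          simp [pvKey, pvStem]
        · have hcond : ((!(pvDictGetD x "ends_with" "" == "")) && PySem.Str.endswith word (pvDictGetD x "ends_with" "") && decide (PySem.Str.len (pvDictGetD x "ends_with" "") > pvKey m)) = false := by
            rw [show ((!(pvDictGetD x "ends_with" "" == "")) && PySem.Str.endswith word (pvDictGetD x "ends_with" "")) = pvMatch word x from rfl, hx]
            simpa [pvKey] using hkm
          simp only [hcond]
          rw [if_neg hkm]
          simp
    · rw [find_insertBy_not_match word x _ ((Bool.eq_false_iff).mpr hx) _]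
      have hc0 : ((!(pvDictGetD x "ends_with" "" == "")) && PySem.Str.endswith word (pvDictGetD x "ends_with" "")) = false := (Bool.eq_false_iff).mpr hx
      cases hf : (PySem.List.sorted l pvKey true).find? (pvMatch word) with
      | none =>
        have hcond : ((!(pvDictGetD x "ends_with" "" == "")) && PySem.Str.endswith word (pvDictGetD x "ends_with" "") && decide (PySem.Str.len (pvDictGetD x "ends_with" "") > (-1 : Int))) = false := by
          rw [hc0]; rfl
        simp only [hcond, Bool.false_eq_true, if_false]
      | some m =>
        have hcond : ((!(pvDictGetD x "ends_with" "" == "")) && PySem.Str.endswith word (pvDictGetD x "ends_with" "") && decide (PySem.Str.len (pvDictGetD x "ends_with" "") > pvKey m)) = false := by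
          rw [hc0]; rfl
        simp only [hcond, Bool.false_eq_true, if_false]

-- ===== VERDICT (by name: the statement is the Claim_ definition above) =====
theorem apply_suffix_rules_py_spec : Claim_equal_apply_suffix_rules_py := by
  intro word rules _
  unfold Spec_apply_suffix_rules_py apply_suffix_rules_py apply_suffix_rules_py_alt
  rw [foldl_eq_find_sorted word rules]
  rw [show (fun r => PySem.Str.len (pvDictGetD r "ends_with" "")) = pvKey from rfl]
  rw [pvLoopA_eq_find word (PySem.List.sorted rules pvKey true)]
  cases (PySem.List.sorted rules pvKey true).find? (pvMatch word) <;> simp
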